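-- pv_equiv track=rewrite | github.com/igorFNegrizoli/medianCutAlgorithm | funcs.py | getmaiorAmplitude
-- ===== SOURCE A (Python) =====
-- def getAmplitude(group, channel):
--     minVal = 256
--     maxVal = 0
--     for i in group:
--         if i[channel] > maxVal:
--             maxVal = i[channel]
--         if i[channel] < minVal:
--             minVal = i[channel]
--     return maxVal-minVal
--
-- def getmaiorAmplitude(group):
--     greaterAmp = 0
--     greaterCh = 0
--     for i in range(3):
--         aux = getAmplitude(group, i)
--         if aux > greaterAmp:
--             greaterAmp = aux
--             greaterCh = i
--     return greaterCh
-- ===== SOURCE B (Python) =====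
-- def getmaiorAmplitude(group):
--     mx0 = mx1 = mx2 = 0
--     mn0 = mn1 = mn2 = 256
--     for r, g, b in group:
--         if r > mx0: mx0 = r
--         if r < mn0: mn0 = r
--         if g > mx1: mx1 = g
--         if g < mn1: mn1 = g
--         if b > mx2: mx2 = b
--         if b < mn2: mn2 = b
--     amps = (mx0 - mn0, mx1 - mn1, mx2 - mn2)
--     greaterAmp = 0
--     greaterCh = 0
--     for ch, amp in enumerate(amps):
--         if amp > greaterAmp:
--             greaterAmp = amp
--             greaterCh = ch
--     return greaterCh
-- ===== Notes on version B (the rewrite author's own statement) =====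
-- stated objective: alternative
-- what changed: B fuses A's three full scans (one per channel via getAmplitude) into a single pass that maintains running min/max for all three channels at once, then picks the channel with a short selection loop over the three amplitudes.
import Mathlib
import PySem

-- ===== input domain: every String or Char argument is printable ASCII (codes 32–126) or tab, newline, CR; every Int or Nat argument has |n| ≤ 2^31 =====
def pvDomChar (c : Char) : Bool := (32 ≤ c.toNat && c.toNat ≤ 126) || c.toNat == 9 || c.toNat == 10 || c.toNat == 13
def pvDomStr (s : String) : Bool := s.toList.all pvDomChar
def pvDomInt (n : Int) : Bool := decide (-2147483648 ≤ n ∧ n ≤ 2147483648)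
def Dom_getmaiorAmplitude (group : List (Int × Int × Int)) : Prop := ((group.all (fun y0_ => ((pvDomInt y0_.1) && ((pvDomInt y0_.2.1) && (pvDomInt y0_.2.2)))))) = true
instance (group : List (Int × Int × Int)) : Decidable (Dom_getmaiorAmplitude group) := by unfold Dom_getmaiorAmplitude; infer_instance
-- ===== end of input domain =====

-- B fuses A's three per-channel scans into one pass maintaining all three running min/max pairs; same result, one traversal instead of three.

-- ===== PORT A =====
-- i[channel] for channel ∈ {0,1,2} on a 3-tuple
def pvSel (c : Int) (p : Int × Int × Int) : Int :=
  if c = 0 then p.1 else if c = 1 then p.2.1 else p.2.2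

-- loop body of getAmplitude; state = (minVal, maxVal)
def pvStepA (c : Int) (mv : Int × Int) (i : Int × Int × Int) : Int × Int :=
  let v := pvSel c i
  (if v < mv.1 then v else mv.1, if v > mv.2 then v else mv.2)

def getAmplitude (group : List (Int × Int × Int)) (c : Int) : Int :=
  let st := group.foldl (pvStepA c) (256, 0)
  st.2 - st.1

def getmaiorAmplitude (group : List (Int × Int × Int)) : Int :=
  let st := (PySem.List.pyRange 0 3 1).foldl (fun (s : Int × Int) i =>
    let aux := getAmplitude group i
    if aux > s.1 then (aux, i) else s) (0, 0)
  st.2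

-- ===== PORT B =====
-- fused loop body; state = ((mn0,mx0),(mn1,mx1),(mn2,mx2))
def pvStepB (s : (Int × Int) × (Int × Int) × (Int × Int)) (p : Int × Int × Int) :
    (Int × Int) × (Int × Int) × (Int × Int) :=
  ((if p.1 < s.1.1 then p.1 else s.1.1, if p.1 > s.1.2 then p.1 else s.1.2),
   (if p.2.1 < s.2.1.1 then p.2.1 else s.2.1.1, if p.2.1 > s.2.1.2 then p.2.1 else s.2.1.2),
   (if p.2.2 < s.2.2.1 then p.2.2 else s.2.2.1, if p.2.2 > s.2.2.2 then p.2.2 else s.2.2.2))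

def getmaiorAmplitude_alt (group : List (Int × Int × Int)) : Int :=
  let st := group.foldl pvStepB ((256, 0), (256, 0), (256, 0))
  let amps : List Int := [st.1.2 - st.1.1, st.2.1.2 - st.2.1.1, st.2.2.2 - st.2.2.1]
  let sel := (PySem.List.enumerate amps 0).foldl (fun (s : Int × Int) ai =>
    if ai.2 > s.1 then (ai.2, (ai.1 : Int)) else s) (0, 0)
  sel.2

-- ===== PRECONDITION & SPEC =====
def Spec_getmaiorAmplitude (group : List (Int × Int × Int)) (out : Int) : Prop := out = getmaiorAmplitude_alt group
instance (group : List (Int × Int × Int)) (out : Int) : Decidable (Spec_getmaiorAmplitude group out) := by unfold Spec_getmaiorAmplitude; infer_instance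

-- ===== CLAIM (what is proved, stated in full; the proofs are below) =====
def Claim_equal_getmaiorAmplitude : Prop := ∀ (group : List (Int × Int × Int)), Dom_getmaiorAmplitude group → Spec_getmaiorAmplitude group (getmaiorAmplitude group)

-- ===== LEMMAS AND PROOFS =====
-- the fused fold computes the three per-channel folds
lemma foldB_eq_foldA (group : List (Int × Int × Int))
    (s : (Int × Int) × (Int × Int) × (Int × Int)) :
    group.foldl pvStepB s =
      (group.foldl (pvStepA 0) s.1, group.foldl (pvStepA 1) s.2.1, group.foldl (pvStepA 2) s.2.2) := by
  induction group generalizing s with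
  | nil => rfl
  | cons p t ih =>
    simp only [List.foldl_cons, ih, pvStepB, pvStepA, pvSel]
    norm_num

-- ===== VERDICT (by name: the statement is the Claim_ definition above) =====
theorem getmaiorAmplitude_spec : Claim_equal_getmaiorAmplitude := by
  intro group _
  show getmaiorAmplitude group = getmaiorAmplitude_alt group
  unfold getmaiorAmplitude getmaiorAmplitude_alt getAmplitude
  rw [foldB_eq_foldA]
  have hr : PySem.List.pyRange 0 3 1 = [0, 1, 2] := by decide
  rw [hr]
  simp only [PySem.List.enumerate, List.foldl_cons, List.foldl_nil]
  generalize (List.foldl (pvStepA 0) (256, 0) group).2 - (List.foldl (pvStepA 0) (256, 0) group).1 = a0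
  generalize (List.foldl (pvStepA 1) (256, 0) group).2 - (List.foldl (pvStepA 1) (256, 0) group).1 = a1
  generalize (List.foldl (pvStepA 2) (256, 0) group).2 - (List.foldl (pvStepA 2) (256, 0) group).1 = a2
  norm_num
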